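-- pv_equiv track=rewrite | github.com/pabloschwarzenberg/grader | hito2_ej3/hito2_ej3_6eca4248dcba5d3025445146f4213c87.py | subSecuencia
-- ===== SOURCE A (Python) =====
-- def subSecuencia(a,n):
--     import random
--     from random import shuffle
--
--     i=0
--     lista1=[]
--     while i<len(a):
--         lista1.append(a[i])
--         i=i+1
--
--     def potencia(c):
--         if len(c) == 0:
--             return [[]]
--         r = potencia(c[:-1])
--         return r + [s + [c[-1]] for s in r]
--
--     def combinaciones(c, n):
--         return [s for s in potencia(c) if len(s) == n]
--
--     z=combinaciones(lista1,3)
--     lista2=[]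
--     j=0
--     while j<len(z):
--         if z.count(z[j])==1 and z[j][0]!=z[j][1] and z[j][1]!=z[j][2] and z[j][0]!=z[j][2] and z[j]:
--             lista2.append(z[j])
--         j=j+1
--     lista3=[]
--     k=0
--     while k<len(lista2)-1:
--         if lista2[k][::-1]==lista2[k+1]:
--             lista3.append(lista2[k])
--         k=k+1
--     lista4=[]
--     l=0
--     while l<len(lista3):
--         lista4.append("".join(lista3[l]))
--         l=l+1
--     m=0
--     lista5=[]
--     while m<len(lista4):
--         lista5.append(lista4[m].lower())
--         m=m+1
--     if len(lista5)!=0: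
--         return lista5
--     return ["ninguna"]
-- ===== SOURCE B (Python) =====
-- def subSecuencia(a, n):
--     from collections import Counter
--     c = list(a)
--     m = len(c)
--     z = [(c[i], c[j], c[k]) for k in range(m) for j in range(k) for i in range(j)]
--     cnt = Counter(z)
--     lista2 = [t for t in z
--               if cnt[t] == 1 and t[0] != t[1] and t[1] != t[2] and t[0] != t[2]]
--     res = [(x + y + w).lower()
--            for (x, y, w), nxt in zip(lista2, lista2[1:]) if (w, y, x) == nxt]
--     return res if res else ["ninguna"]
-- ===== Notes on version B (the rewrite author's own statement) =====
-- stated objective: faster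
-- what changed: Replaces the exponential power-set generation plus quadratic z.count scan with direct O(n^3) triple-index loops (same power-set order) and a Counter for the uniqueness test.
import Mathlib
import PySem

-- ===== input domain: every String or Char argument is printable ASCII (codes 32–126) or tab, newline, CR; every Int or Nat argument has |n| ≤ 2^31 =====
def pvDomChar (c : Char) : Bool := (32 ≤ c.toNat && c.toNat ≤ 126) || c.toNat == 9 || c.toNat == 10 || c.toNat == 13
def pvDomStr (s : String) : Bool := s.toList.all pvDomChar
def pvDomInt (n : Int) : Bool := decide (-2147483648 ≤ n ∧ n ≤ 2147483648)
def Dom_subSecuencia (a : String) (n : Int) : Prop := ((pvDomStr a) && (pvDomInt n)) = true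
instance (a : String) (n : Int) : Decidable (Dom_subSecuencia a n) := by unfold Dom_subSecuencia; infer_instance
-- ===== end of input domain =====

-- B replaces A's exponential power-set enumeration by direct O(n^3) triple-index loops in the
-- same order and a Counter for the uniqueness test; the returned list is proved equal on all inputs.

-- ===== PORT A =====
-- while i < len(a): lista1.append(a[i]); i = i + 1
def pvLista1 (cs : List Char) : List Char :=
  (PySem.List.pyRange 0 (cs.length : Int) 1).foldl
    (fun acc i => acc ++ [PySem.List.pyGetD cs i ' ']) []

def potencia (c : List Char) : List (List Char) :=
  if h : c = [] then [[]]
  else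
    let r := potencia c.dropLast
    r ++ r.map (fun s => s ++ [c.getLast h])
termination_by c.length
decreasing_by
  have : 0 < c.length := List.length_pos_iff.mpr h
  simp [List.length_dropLast]; omega

def combinaciones (c : List Char) (nn : Int) : List (List Char) :=
  (potencia c).filter (fun s => (s.length : Int) == nn)

-- while j < len(z): if z.count(z[j])==1 and z[j][0]!=z[j][1] and z[j][1]!=z[j][2]
--                      and z[j][0]!=z[j][2] and z[j]: lista2.append(z[j])
def pvLista2 (z : List (List Char)) : List (List Char) :=
  z.foldl (fun acc t =>
    if (PySem.List.count z t == 1) && !(t.getD 0 ' ' == t.getD 1 ' ')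
        && !(t.getD 1 ' ' == t.getD 2 ' ') && !(t.getD 0 ' ' == t.getD 2 ' ')
        && !(t == []) then acc ++ [t] else acc) []

-- while k < len(lista2)-1: if lista2[k][::-1]==lista2[k+1]: lista3.append(lista2[k])
-- (t[::-1] is t.reverse: PySem.List.slice?_none_none_neg_one)
def pvLista3 : List (List Char) → List (List Char)
  | x :: y :: rest => (if x.reverse == y then [x] else []) ++ pvLista3 (y :: rest)
  | _ => []

def subSecuencia (a : String) (n : Int) : List String :=
  let lista1 := pvLista1 a.toList
  let z := combinaciones lista1 3
  let lista2 := pvLista2 z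
  let lista3 := pvLista3 lista2
  let lista4 := lista3.map (fun t => String.ofList t)      -- "".join(t)
  let lista5 := lista4.map PySem.Str.lower
  if lista5.length ≠ 0 then lista5 else ["ninguna"]

-- ===== PORT B =====
-- [(c[i], c[j], c[k]) for k in range(m) for j in range(k) for i in range(j)]
def pvTriples (c : List Char) : List (Char × Char × Char) :=
  (PySem.List.pyRange 0 (c.length : Int) 1).flatMap fun k =>
    (PySem.List.pyRange 0 k 1).flatMap fun j =>
      (PySem.List.pyRange 0 j 1).map fun i =>
        (PySem.List.pyGetD c i ' ', PySem.List.pyGetD c j ' ', PySem.List.pyGetD c k ' ')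

def subSecuencia_alt (a : String) (n : Int) : List String :=
  let c := a.toList
  let z := pvTriples c
  let cnt := PySem.Dict.counter z
  let lista2 := z.filter (fun t =>
    (cnt.getD t 0 == 1) && !(t.1 == t.2.1) && !(t.2.1 == t.2.2) && !(t.1 == t.2.2))
  let res := (lista2.zip (lista2.drop 1)).filterMap (fun p =>
    if ((p.1.2.2, p.1.2.1, p.1.1) == p.2) then
      some (PySem.Str.lower (String.ofList [p.1.1, p.1.2.1, p.1.2.2]))
    else none)
  if res = [] then ["ninguna"] else res

-- ===== PRECONDITION & SPEC =====
def Spec_subSecuencia (a : String) (n : Int) (out : List String) : Prop := out = subSecuencia_alt a n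
instance (a : String) (n : Int) (out : List String) : Decidable (Spec_subSecuencia a n out) := by unfold Spec_subSecuencia; infer_instance

-- ===== CLAIM (what is proved, stated in full; the proofs are below) =====
def Claim_equal_subSecuencia : Prop := ∀ (a : String) (n : Int), Dom_subSecuencia a n → Spec_subSecuencia a n (subSecuencia a n)

-- ===== LEMMAS AND PROOFS =====

-- the list [t0, t1, t2] A stores where B stores the tuple (t0, t1, t2)
def pvG3 (t : Char × Char × Char) : List Char := [t.1, t.2.1, t.2.2]

-- the size-2 analogue of pvTriples, used to run the snoc induction down from size 3
def pvPairs (c : List Char) : List (Char × Char) :=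
  (PySem.List.pyRange 0 (c.length : Int) 1).flatMap fun j =>
    (PySem.List.pyRange 0 j 1).map fun i =>
      (PySem.List.pyGetD c i ' ', PySem.List.pyGetD c j ' ')

theorem pvLista1_eq (cs : List Char) : pvLista1 cs = cs := by
  unfold pvLista1
  rw [PySem.List.foldl_append_singleton_eq_map]
  exact PySem.List.map_pyGetD_pyRange_zero' cs ' '

theorem pvGetD_app (c : List Char) (x : Char) (i : Int) (h0 : 0 ≤ i) (h1 : i < c.length) :
    PySem.List.pyGetD (c ++ [x]) i ' ' = PySem.List.pyGetD c i ' ' := by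
  rw [PySem.List.pyGetD_of_nonneg _ _ h0, PySem.List.pyGetD_of_nonneg _ _ h0]
  rw [List.getD_append]; omega

theorem pvGetD_last (c : List Char) (x : Char) :
    PySem.List.pyGetD (c ++ [x]) (c.length : Int) ' ' = x := by
  rw [PySem.List.pyGetD_natCast]; simp

theorem potencia_nil : potencia [] = [[]] := by rw [potencia]; simp

theorem potencia_snoc (c : List Char) (x : Char) :
    potencia (c ++ [x]) = potencia c ++ (potencia c).map (· ++ [x]) := by
  rw [potencia]
  simp

theorem filter_potencia_snoc (c : List Char) (x : Char) (k : Int) :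
    (potencia (c ++ [x])).filter (fun s => (s.length : Int) == k) =
      (potencia c).filter (fun s => (s.length : Int) == k) ++
        ((potencia c).filter (fun s => (s.length : Int) == k - 1)).map (· ++ [x]) := by
  rw [potencia_snoc, List.filter_append, List.filter_map]
  congr 2
  apply List.filter_congr
  intro s _
  show (((s ++ [x]).length : Int) == k) = ((s.length : Int) == k - 1)
  simp; omega

theorem filter_potencia_neg (c : List Char) :
    (potencia c).filter (fun s => (s.length : Int) == -1) = [] := by
  rw [List.filter_eq_nil_iff]
  intro s _
  simp

theorem pvFilter0 (c : List Char) :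
    (potencia c).filter (fun s => (s.length : Int) == 0) = [[]] := by
  induction c using List.reverseRecOn with
  | nil => rw [potencia_nil]; simp
  | append_singleton c x ih =>
      rw [filter_potencia_snoc]
      norm_num [filter_potencia_neg, ih]

theorem pvFilter1 (c : List Char) :
    (potencia c).filter (fun s => (s.length : Int) == 1) = c.map (fun y => [y]) := by
  induction c using List.reverseRecOn with
  | nil => rw [potencia_nil]; simp
  | append_singleton c x ih =>
      rw [filter_potencia_snoc]
      norm_num [pvFilter0, ih]

theorem pvPairs_snoc (c : List Char) (x : Char) :
    pvPairs (c ++ [x]) = pvPairs c ++ c.map (fun y => (y, x)) := by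
  unfold pvPairs
  have hlen : ((c ++ [x]).length : Int) = (c.length : Int) + 1 := by simp
  rw [hlen, PySem.List.pyRange_one_succ_right (by positivity), List.flatMap_append]
  congr 1
  · apply List.flatMap_congr
    intro j hj
    obtain ⟨hj0, hj1⟩ := (PySem.List.mem_pyRange_one).mp hj
    apply List.map_congr_left
    intro i hi
    obtain ⟨hi0, hi1⟩ := (PySem.List.mem_pyRange_one).mp hi
    rw [pvGetD_app c x i hi0 (by omega), pvGetD_app c x j hj0 (by omega)]
  · simp only [List.flatMap_cons, List.flatMap_nil, List.append_nil]
    rw [pvGetD_last]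
    have h1 : (PySem.List.pyRange 0 (c.length : Int) 1).map
          (fun i => (PySem.List.pyGetD (c ++ [x]) i ' ', x))
        = ((PySem.List.pyRange 0 (c.length : Int) 1).map
            (fun i => PySem.List.pyGetD c i ' ')).map (fun y => (y, x)) := by
      rw [List.map_map]
      apply List.map_congr_left
      intro i hi
      obtain ⟨hi0, hi1⟩ := (PySem.List.mem_pyRange_one).mp hi
      simp [pvGetD_app c x i hi0 (by omega)]
    rw [h1, PySem.List.map_pyGetD_pyRange_zero' c ' ']

theorem pvTriples_snoc (c : List Char) (x : Char) :
    pvTriples (c ++ [x]) = pvTriples c ++ (pvPairs c).map (fun p => (p.1, p.2, x)) := by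
  unfold pvTriples
  have hlen : ((c ++ [x]).length : Int) = (c.length : Int) + 1 := by simp
  rw [hlen, PySem.List.pyRange_one_succ_right (by positivity), List.flatMap_append]
  congr 1
  · apply List.flatMap_congr
    intro k hk
    obtain ⟨hk0, hk1⟩ := (PySem.List.mem_pyRange_one).mp hk
    apply List.flatMap_congr
    intro j hj
    obtain ⟨hj0, hj1⟩ := (PySem.List.mem_pyRange_one).mp hj
    apply List.map_congr_left
    intro i hi
    obtain ⟨hi0, hi1⟩ := (PySem.List.mem_pyRange_one).mp hi
    rw [pvGetD_app c x i hi0 (by omega), pvGetD_app c x j hj0 (by omega),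
        pvGetD_app c x k hk0 (by omega)]
  · simp only [List.flatMap_cons, List.flatMap_nil, List.append_nil]
    rw [pvGetD_last]
    have h2 : (pvPairs c).map (fun p => (p.1, p.2, x)) =
        (PySem.List.pyRange 0 (c.length : Int) 1).flatMap fun j =>
          (PySem.List.pyRange 0 j 1).map fun i =>
            (PySem.List.pyGetD c i ' ', PySem.List.pyGetD c j ' ', x) := by
      unfold pvPairs
      rw [List.map_flatMap]
      apply List.flatMap_congr
      intro j hj
      rw [List.map_map]
      rfl
    rw [h2]
    apply List.flatMap_congr
    intro j hj
    obtain ⟨hj0, hj1⟩ := (PySem.List.mem_pyRange_one).mp hj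
    apply List.map_congr_left
    intro i hi
    obtain ⟨hi0, hi1⟩ := (PySem.List.mem_pyRange_one).mp hi
    rw [pvGetD_app c x i hi0 (by omega), pvGetD_app c x j hj0 (by omega)]

theorem pvFilter2 (c : List Char) :
    (potencia c).filter (fun s => (s.length : Int) == 2) = (pvPairs c).map (fun p => [p.1, p.2]) := by
  induction c using List.reverseRecOn with
  | nil => rw [potencia_nil]; simp [pvPairs]
  | append_singleton c x ih =>
      rw [filter_potencia_snoc, pvPairs_snoc]
      norm_num [pvFilter1, ih, List.map_map]

theorem pvFilter3 (c : List Char) :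
    (potencia c).filter (fun s => (s.length : Int) == 3) = (pvTriples c).map pvG3 := by
  induction c using List.reverseRecOn with
  | nil => rw [potencia_nil]; simp [pvTriples]
  | append_singleton c x ih =>
      rw [filter_potencia_snoc, pvTriples_snoc]
      norm_num [pvFilter2, ih, List.map_map, pvG3]

theorem pvG3_injective : Function.Injective pvG3 := by
  intro ⟨a1, a2, a3⟩ ⟨b1, b2, b3⟩ h
  simp [pvG3] at h
  simp [h.1, h.2.1, h.2.2]

theorem pvLista2_eq (c : List Char) :
    pvLista2 ((pvTriples c).map pvG3) =
      ((pvTriples c).filter (fun t =>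
        ((PySem.Dict.counter (pvTriples c)).getD t 0 == 1) && !(t.1 == t.2.1)
          && !(t.2.1 == t.2.2) && !(t.1 == t.2.2))).map pvG3 := by
  unfold pvLista2
  rw [PySem.List.foldl_append_if_eq_filter, List.nil_append, List.filter_map]
  congr 1
  apply List.filter_congr
  intro t _
  simp only [Function.comp_apply]
  rw [PySem.List.count_eq, List.count_map_of_injective (pvTriples c) pvG3 pvG3_injective t]
  obtain ⟨a1, a2, a3⟩ := t
  simp [PySem.Dict.getD_counter, pvG3]
  congr 1
  by_cases h : List.count (a1, a2, a3) (pvTriples c) = 1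
  · simp [h]
  · rw [Bool.eq_iff_iff]
    simp [beq_iff_eq, h]

theorem pvAdj (l : List (Char × Char × Char)) :
    (pvLista3 (l.map pvG3)).map (fun t => PySem.Str.lower (String.ofList t)) =
      (l.zip (l.drop 1)).filterMap (fun p =>
        if ((p.1.2.2, p.1.2.1, p.1.1) == p.2) then
          some (PySem.Str.lower (String.ofList [p.1.1, p.1.2.1, p.1.2.2]))
        else none) := by
  induction l with
  | nil => simp [pvLista3]
  | cons t rest ih =>
      cases rest with
      | nil => simp [pvLista3]
      | cons t' rest' =>
          simp only [List.map_cons, pvLista3, List.drop_succ_cons, List.drop_zero,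
            List.zip_cons_cons, List.filterMap_cons]
          have hcond : ((pvG3 t).reverse == pvG3 t') = ((t.2.2, t.2.1, t.1) == t') := by
            obtain ⟨a1, a2, a3⟩ := t
            obtain ⟨b1, b2, b3⟩ := t'
            rw [Bool.eq_iff_iff]
            simp [pvG3, beq_iff_eq, Prod.ext_iff, and_comm, and_assoc]
          rw [hcond]
          by_cases h : ((t.2.2, t.2.1, t.1) == t') = true
          · simp only [h, if_true, List.map_append, List.map_cons, List.map_nil]
            simp only [List.map_cons] at ih
            rw [ih]
            simp [pvG3]
          · simp only [Bool.not_eq_true] at h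
            simp only [List.map_cons] at ih
            simp [h, ih]

-- ===== VERDICT (by name: the statement is the Claim_ definition above) =====
theorem subSecuencia_spec : Claim_equal_subSecuencia := by
  intro a n _
  unfold Spec_subSecuencia subSecuencia subSecuencia_alt combinaciones
  simp only [pvLista1_eq, pvFilter3, pvLista2_eq]
  rw [List.map_map]
  rw [show (PySem.Str.lower ∘ fun t => String.ofList t) = (fun t => PySem.Str.lower (String.ofList t)) from rfl]
  rw [pvAdj]
  generalize (List.filterMap _ _ : List String) = w
  cases w <;> simp
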